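-- pv_equiv track=rewrite | github.com/cyche23/extractive_summarization_bilstm_attention | src/preprocess/preprocess.py | restore_abbreviations
-- ===== SOURCE A (Python) =====
-- def restore_abbreviations(sentences):
--     # 把占位符替换回真实缩写
--     restore = {
--         "USA_PROTECTED": "U.S.A.",
--         "US_PROTECTED": "U.S.",
--         "Mr_PROTECTED": "Mr.",
--         "Mrs_PROTECTED": "Mrs.",
--         "Dr_PROTECTED": "Dr.",
--         "Ms_PROTECTED": "Ms.",
--     }
--     restored = []
--     for s in sentences:
--         for token, val in restore.items():
--             s = s.replace(token, val)
--         restored.append(s)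
--     return restored
-- ===== SOURCE B (Python) =====
-- # Single left-to-right scan (like a compiled regex alternation) instead of six sequential replace passes.
-- _PAIRS = [
--     ("USA_PROTECTED", "U.S.A."),
--     ("US_PROTECTED", "U.S."),
--     ("Mr_PROTECTED", "Mr."),
--     ("Mrs_PROTECTED", "Mrs."),
--     ("Dr_PROTECTED", "Dr."),
--     ("Ms_PROTECTED", "Ms."),
-- ]
--
-- def restore_abbreviations(sentences):
--     restored = []
--     for s in sentences:
--         parts = []
--         i = 0
--         n = len(s)
--         while i < n:
--             for tok, val in _PAIRS:
--                 if s.startswith(tok, i):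
--                     parts.append(val)
--                     i += len(tok)
--                     break
--             else:
--                 parts.append(s[i])
--                 i += 1
--         restored.append("".join(parts))
--     return restored
-- ===== Notes on version B (the rewrite author's own statement) =====
-- stated objective: alternative
-- what changed: A runs six sequential whole-string str.replace passes (one per placeholder) over each sentence; B does a single left-to-right scan per sentence, matching the placeholder table once at each position (regex-alternation style) and emitting the result in one pass.
-- intended difference: On sentences containing "Ms_PROTECTEDr_PROTECTED" the "Dr." that A's Dr-pass writes re-creates an "Ms_PROTECTED" occurrence that A's later Ms-pass replaces again (A yields "Ms.r."), while B replaces each original placeholder occurrence exactly once, leftmost first (B yields "Ms.r_PROTECTED"), which is the intended restoration. — e.g. on restore_abbreviations(["Ms_PROTECTEDr_PROTECTED"]): A returns ["Ms.r."], B returns ["Ms.r_PROTECTED"]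
import Mathlib
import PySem

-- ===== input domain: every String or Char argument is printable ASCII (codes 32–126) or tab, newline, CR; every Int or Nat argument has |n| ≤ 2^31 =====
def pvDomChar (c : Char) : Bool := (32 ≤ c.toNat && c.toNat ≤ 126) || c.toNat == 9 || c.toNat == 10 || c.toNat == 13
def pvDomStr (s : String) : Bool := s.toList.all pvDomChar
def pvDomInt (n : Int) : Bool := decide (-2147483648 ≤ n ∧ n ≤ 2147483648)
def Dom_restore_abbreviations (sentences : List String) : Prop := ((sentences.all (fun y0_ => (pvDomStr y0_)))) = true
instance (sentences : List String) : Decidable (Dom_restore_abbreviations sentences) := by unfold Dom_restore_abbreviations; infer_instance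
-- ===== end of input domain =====

-- B replaces A's six sequential full-string `str.replace` passes by a single left-to-right scan
-- that matches the placeholder table once at each position (regex-alternation style); on the
-- degenerate overlap "Ms_PROTECTEDr_PROTECTED" A double-substitutes and B keeps the leftmost match.


-- ===== PORT A =====
-- the dict literal built at the top of A
def restoreDict : PySem.Dict String String :=
  (((((PySem.Dict.empty.insert "USA_PROTECTED" "U.S.A.").insert
      "US_PROTECTED" "U.S.").insert
      "Mr_PROTECTED" "Mr.").insert
      "Mrs_PROTECTED" "Mrs.").insert
      "Dr_PROTECTED" "Dr.").insert
      "Ms_PROTECTED" "Ms."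

def restore_abbreviations (sentences : List String) : List String :=
  sentences.foldl
    (fun restored s =>
      restored ++ [restoreDict.items.foldl (fun s2 p => PySem.Str.replace s2 p.1 p.2) s])
    []

-- ===== PORT B =====
-- the placeholder table of Source B (tokens and their abbreviations, in alternation order)
def kUSA : List Char := "USA_PROTECTED".toList
def kUS : List Char := "US_PROTECTED".toList
def kMr : List Char := "Mr_PROTECTED".toList
def kMrs : List Char := "Mrs_PROTECTED".toList
def kDr : List Char := "Dr_PROTECTED".toList
def kMs : List Char := "Ms_PROTECTED".toList
def vUSA : List Char := "U.S.A.".toList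
def vUS : List Char := "U.S.".toList
def vMr : List Char := "Mr.".toList
def vMrs : List Char := "Mrs.".toList
def vDr : List Char := "Dr.".toList
def vMs : List Char := "Ms.".toList

-- Source B's while-loop: at the current position try the tokens in order; on a match emit the
-- abbreviation and jump past the token, otherwise emit the character and move on one.
def scanRestore : List Char → List Char
  | [] => []
  | c :: t =>
    if kUSA.isPrefixOf (c :: t) then vUSA ++ scanRestore (List.drop 13 (c :: t))
    else if kUS.isPrefixOf (c :: t) then vUS ++ scanRestore (List.drop 12 (c :: t))
    else if kMr.isPrefixOf (c :: t) then vMr ++ scanRestore (List.drop 12 (c :: t))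
    else if kMrs.isPrefixOf (c :: t) then vMrs ++ scanRestore (List.drop 13 (c :: t))
    else if kDr.isPrefixOf (c :: t) then vDr ++ scanRestore (List.drop 12 (c :: t))
    else if kMs.isPrefixOf (c :: t) then vMs ++ scanRestore (List.drop 12 (c :: t))
    else c :: scanRestore t
termination_by l => l.length
decreasing_by all_goals simp [List.length_drop]

def restore_abbreviations_alt (sentences : List String) : List String :=
  sentences.foldl (fun restored s => restored ++ [String.ofList (scanRestore s.toList)]) []

-- ===== PRECONDITION & SPEC =====
-- On sentences containing "Ms_PROTECTEDr_PROTECTED" the value "Dr." that A's Dr-pass writes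
-- re-creates an "Ms_PROTECTED" occurrence which A's later Ms-pass also replaces (A returns
-- "Ms.r."), while B replaces each original placeholder occurrence exactly once, leftmost
-- first (B returns "Ms.r_PROTECTED"), which is the intended restoration.
def D_restore_abbreviations (sentences : List String) : Prop :=
  ∃ s ∈ sentences, PySem.Str.isIn "Ms_PROTECTEDr_PROTECTED" s = true
instance (sentences : List String) : Decidable (D_restore_abbreviations sentences) := by
  unfold D_restore_abbreviations; infer_instance

def Spec_restore_abbreviations (sentences : List String) (out : List String) : Prop :=
  ¬ D_restore_abbreviations sentences → out = restore_abbreviations_alt sentences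
instance (sentences : List String) (out : List String) : Decidable (Spec_restore_abbreviations sentences out) := by
  unfold Spec_restore_abbreviations; infer_instance

def pvDiffWitness_restore_abbreviations : List String := ["Ms_PROTECTEDr_PROTECTED"]
def pvDiffWitnessOut_restore_abbreviations : (List String) × (List String) :=
  (["Ms.r."], ["Ms.r_PROTECTED"])

-- ===== CLAIM (what is proved, stated in full; the proofs are below) =====
def Claim_unchanged_restore_abbreviations : Prop := ∀ (sentences : List String), Dom_restore_abbreviations sentences → Spec_restore_abbreviations sentences (restore_abbreviations sentences)
def Claim_changed_restore_abbreviations : Prop := Dom_restore_abbreviations (pvDiffWitness_restore_abbreviations) ∧ D_restore_abbreviations (pvDiffWitness_restore_abbreviations) ∧ restore_abbreviations (pvDiffWitness_restore_abbreviations) = pvDiffWitnessOut_restore_abbreviations.1 ∧ restore_abbreviations_alt (pvDiffWitness_restore_abbreviations) = pvDiffWitnessOut_restore_abbreviations.2 ∧ pvDiffWitnessOut_restore_abbreviations.1 ≠ pvDiffWitnessOut_restore_abbreviations.2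

def Claim_exact_restore_abbreviations : Prop := ∀ (sentences : List String), Dom_restore_abbreviations sentences → D_restore_abbreviations sentences → restore_abbreviations sentences ≠ restore_abbreviations_alt sentences

-- ===== LEMMAS AND PROOFS =====

@[simp] lemma kUSA_chars : kUSA = ['U', 'S', 'A', '_', 'P', 'R', 'O', 'T', 'E', 'C', 'T', 'E', 'D'] := rfl
@[simp] lemma kUS_chars : kUS = ['U', 'S', '_', 'P', 'R', 'O', 'T', 'E', 'C', 'T', 'E', 'D'] := rfl
@[simp] lemma kMr_chars : kMr = ['M', 'r', '_', 'P', 'R', 'O', 'T', 'E', 'C', 'T', 'E', 'D'] := rfl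
@[simp] lemma kMrs_chars : kMrs = ['M', 'r', 's', '_', 'P', 'R', 'O', 'T', 'E', 'C', 'T', 'E', 'D'] := rfl
@[simp] lemma kDr_chars : kDr = ['D', 'r', '_', 'P', 'R', 'O', 'T', 'E', 'C', 'T', 'E', 'D'] := rfl
@[simp] lemma kMs_chars : kMs = ['M', 's', '_', 'P', 'R', 'O', 'T', 'E', 'C', 'T', 'E', 'D'] := rfl
@[simp] lemma vUSA_chars : vUSA = ['U', '.', 'S', '.', 'A', '.'] := rfl
@[simp] lemma vUS_chars : vUS = ['U', '.', 'S', '.'] := rfl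
@[simp] lemma vMr_chars : vMr = ['M', 'r', '.'] := rfl
@[simp] lemma vMrs_chars : vMrs = ['M', 'r', 's', '.'] := rfl
@[simp] lemma vDr_chars : vDr = ['D', 'r', '.'] := rfl
@[simp] lemma vMs_chars : vMs = ['M', 's', '.'] := rfl

-- the patterns of the corner analysis
def rP : List Char := "r_PROTECTED".toList
def sPp : List Char := "s_PROTECTED".toList
def Qpat : List Char := "s_PROTECTEDr_PROTECTED".toList
def Ppat : List Char := "Ms_PROTECTEDr_PROTECTED".toList
@[simp] lemma rP_chars : rP = ['r', '_', 'P', 'R', 'O', 'T', 'E', 'C', 'T', 'E', 'D'] := rfl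
@[simp] lemma sPp_chars : sPp = ['s', '_', 'P', 'R', 'O', 'T', 'E', 'C', 'T', 'E', 'D'] := rfl
@[simp] lemma Qpat_chars : Qpat = ['s', '_', 'P', 'R', 'O', 'T', 'E', 'C', 'T', 'E', 'D', 'r', '_', 'P', 'R', 'O', 'T', 'E', 'C', 'T', 'E', 'D'] := rfl
@[simp] lemma Ppat_chars : Ppat = ['M', 's', '_', 'P', 'R', 'O', 'T', 'E', 'C', 'T', 'E', 'D', 'r', '_', 'P', 'R', 'O', 'T', 'E', 'C', 'T', 'E', 'D'] := rfl

-- clean recursive model of one Python `str.replace` pass (old ≠ [])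
def R (old new : List Char) : List Char → List Char
  | [] => []
  | c :: t =>
    if old.isPrefixOf (c :: t) then new ++ R old new (List.drop (max 1 old.length) (c :: t))
    else c :: R old new t
termination_by l => l.length
decreasing_by all_goals simp [List.length_drop]

lemma R_nil (old new : List Char) : R old new [] = [] := by rw [R]

lemma R_cons (old new : List Char) (c : Char) (t : List Char) :
    R old new (c :: t)
      = if old.isPrefixOf (c :: t) then new ++ R old new (List.drop (max 1 old.length) (c :: t))
        else c :: R old new t := by rw [R]

lemma R_pos (old new : List Char) (l : List Char) (h : old.isPrefixOf l = true) (hl : l ≠ []) :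
    R old new l = new ++ R old new (List.drop (max 1 old.length) l) := by
  cases l with
  | nil => exact absurd rfl hl
  | cons c t => rw [R_cons, if_pos h]

lemma R_neg (old new : List Char) (c : Char) (t : List Char)
    (h : old.isPrefixOf (c :: t) = false) :
    R old new (c :: t) = c :: R old new t := by
  rw [R_cons, if_neg (by simp [h])]

lemma go_zero (old new l acc : List Char) :
    PySem.Chars.replace.go old new 0 l acc = acc.reverse ++ l := by
  rw [PySem.Chars.replace.go]

lemma go_succ_nil (old new acc : List Char) (fuel : Nat) :
    PySem.Chars.replace.go old new (fuel + 1) [] acc = acc.reverse := by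
  rw [PySem.Chars.replace.go]
  all_goals omega

lemma go_succ_cons (old new : List Char) (fuel : Nat) (c : Char) (t acc : List Char) :
    PySem.Chars.replace.go old new (fuel + 1) (c :: t) acc
      = if old.isPrefixOf (c :: t) then
          PySem.Chars.replace.go old new fuel (List.drop old.length (c :: t)) (new.reverse ++ acc)
        else PySem.Chars.replace.go old new fuel t (c :: acc) := by
  rw [PySem.Chars.replace.go]

lemma go_eq (old new : List Char) (hold : old ≠ []) :
    ∀ (fuel : Nat) (l acc : List Char), l.length ≤ fuel →
      PySem.Chars.replace.go old new fuel l acc = acc.reverse ++ R old new l := by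
  have hpos : 1 ≤ old.length := List.length_pos_of_ne_nil hold
  intro fuel
  induction fuel with
  | zero =>
    intro l acc h
    have hl : l = [] := List.length_eq_zero_iff.mp (Nat.le_zero.mp h)
    subst hl
    rw [go_zero, R_nil]
  | succ fuel ih =>
    intro l acc h
    cases l with
    | nil => rw [go_succ_nil, R_nil]; simp
    | cons c t =>
      rw [go_succ_cons]
      by_cases hp : old.isPrefixOf (c :: t) = true
      · rw [if_pos hp]
        rw [ih (List.drop old.length (c :: t)) (new.reverse ++ acc)
          (by simp only [List.length_drop, List.length_cons] at h ⊢; omega)]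
        rw [R_pos old new _ hp (by simp)]
        have hmax : max 1 old.length = old.length := by omega
        rw [hmax]
        simp
      · rw [if_neg hp]
        rw [ih t (c :: acc) (by simp only [List.length_cons] at h; omega)]
        rw [R_neg old new c t (Bool.eq_false_iff.mpr hp)]
        simp

lemma replace_eq_R (s old new : List Char) (h : old ≠ []) :
    PySem.Chars.replace s old new = R old new s := by
  unfold PySem.Chars.replace
  rw [if_neg (by simp [h])]
  simpa using go_eq old new h s.length s [] le_rfl

lemma R_append (old new : List Char) :
    ∀ (v x : List Char), (∀ p, p < v.length → old.isPrefixOf (v.drop p ++ x) = false) →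
      R old new (v ++ x) = v ++ R old new x := by
  intro v
  induction v with
  | nil => intro x _; simp
  | cons a v ih =>
    intro x h
    rw [List.cons_append, R_neg old new a (v ++ x) (by simpa using h 0 (by simp))]
    exact congrArg (a :: ·) (ih x (fun p hp => by simpa using h (p + 1) (by simpa using hp)))

-- a pattern none of whose characters can start the inserted value passes backwards through a pass
lemma prefix_R_pullback (old new : List Char) (hnew : new ≠ []) :
    ∀ (l p : List Char), (∀ c ∈ p, some c ≠ new.head?) →
      p <+: R old new l → p <+: l := by
  intro l
  induction l with
  | nil =>
    intro p _ hpre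
    rw [R_nil] at hpre
    exact hpre
  | cons c t ih =>
    intro p hp hpre
    by_cases hk : old.isPrefixOf (c :: t) = true
    · rw [R_pos old new _ hk (by simp)] at hpre
      cases p with
      | nil => exact List.nil_prefix
      | cons a p' =>
        exfalso
        obtain ⟨n0, n', rfl⟩ : ∃ n0 n', new = n0 :: n' := by
          cases new with
          | nil => exact absurd rfl hnew
          | cons n0 n' => exact ⟨n0, n', rfl⟩
        rw [List.cons_append, List.cons_prefix_cons] at hpre
        exact hp a (by simp) (by simp [hpre.1])
    · rw [R_neg old new c t (Bool.eq_false_iff.mpr hk)] at hpre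
      cases p with
      | nil => exact List.nil_prefix
      | cons a p' =>
        rw [List.cons_prefix_cons] at hpre ⊢
        exact ⟨hpre.1, ih p' (fun x hx => hp x (by simp [hx])) hpre.2⟩

-- the one exceptional pass: "s_PROTECTED" can be created by the Dr-pass, exactly
-- when the scanned text contained "s_PROTECTEDr_PROTECTED"
lemma sPp_pullback :
    ∀ (l : List Char) (q : Nat), sPp.drop q <+: R kDr vDr l →
      sPp.drop q <+: l ∨ Qpat.drop q <+: l := by
  intro l
  induction l with
  | nil =>
    intro q h
    rw [R_nil] at h
    exact Or.inl h
  | cons c t ih =>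
    intro q h
    by_cases hq : 11 ≤ q
    · left
      have hnil : sPp.drop q = [] := List.drop_eq_nil_of_le (by simp; omega)
      rw [hnil]
      exact List.nil_prefix
    · have hq' : q < 11 := by omega
      by_cases hk : kDr.isPrefixOf (c :: t) = true
      · rw [R_pos kDr vDr _ hk (by simp)] at h
        by_cases hq10 : q = 10
        · right
          subst hq10
          have : Qpat.drop 10 = kDr := by simp
          rw [this]
          exact List.isPrefixOf_iff_prefix.mp hk
        · exfalso
          have hql : q < sPp.length := by simp; omega
          rw [List.drop_eq_getElem_cons hql] at h
          simp only [vDr_chars, List.cons_append] at h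
          rw [List.cons_prefix_cons] at h
          obtain ⟨h1, -⟩ := h
          interval_cases q <;> simp_all
      · rw [R_neg kDr vDr c t (Bool.eq_false_iff.mpr hk)] at h
        have hql : q < sPp.length := by simp; omega
        rw [List.drop_eq_getElem_cons hql] at h
        rw [List.cons_prefix_cons] at h
        rcases ih (q + 1) h.2 with h2 | h2
        · left
          rw [List.drop_eq_getElem_cons hql, List.cons_prefix_cons]
          exact ⟨h.1, h2⟩
        · right
          have hqQ : q < Qpat.length := by simp; omega
          rw [List.drop_eq_getElem_cons hqQ, List.cons_prefix_cons]
          refine ⟨?_, h2⟩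
          rw [← h.1]
          interval_cases q <;> rfl
  

-- ===== positional non-interference facts =====

-- abbreviation values already written can never be (part of) a later match
lemma val_absorb (old new v : List Char) (x : List Char)
    (hv : v = vUSA ∨ v = vUS ∨ v = vMr ∨ v = vMrs ∨ v = vDr ∨ v = vMs)
    (hold : old = kUSA ∨ old = kUS ∨ old = kMr ∨ old = kMrs ∨ old = kDr ∨ old = kMs) :
    R old new (v ++ x) = v ++ R old new x := by
  apply R_append
  intro p hp
  rcases hv with rfl | rfl | rfl | rfl | rfl | rfl <;>
    simp only [vUSA_chars, vUS_chars, vMr_chars, vMrs_chars, vDr_chars, vMs_chars,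
      List.length_cons, List.length_nil] at hp <;>
  rcases hold with rfl | rfl | rfl | rfl | rfl | rfl <;>
  interval_cases p <;> simp [List.isPrefixOf]

-- a pass for one of the first four tokens walks over any other whole token in place
set_option maxHeartbeats 1000000 in
lemma key_pass (old new k : List Char) (x : List Char)
    (hpair : (old = kUSA ∧ (k = kUS ∨ k = kMr ∨ k = kMrs ∨ k = kDr ∨ k = kMs))
      ∨ (old = kUS ∧ (k = kMr ∨ k = kMrs ∨ k = kDr ∨ k = kMs))
      ∨ (old = kMr ∧ (k = kMrs ∨ k = kDr ∨ k = kMs))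
      ∨ (old = kMrs ∧ (k = kDr ∨ k = kMs))) :
    R old new (k ++ x) = k ++ R old new x := by
  apply R_append
  intro p hp
  rcases hpair with ⟨rfl, rfl | rfl | rfl | rfl | rfl⟩ | ⟨rfl, rfl | rfl | rfl | rfl⟩
    | ⟨rfl, rfl | rfl | rfl⟩ | ⟨rfl, rfl | rfl⟩ <;>
  simp only [kUS_chars, kMr_chars, kMrs_chars, kDr_chars, kMs_chars,
      List.length_cons, List.length_nil] at hp <;>
  interval_cases p <;> simp [List.isPrefixOf]

-- the Dr-pass walks over a whole "Ms_PROTECTED" too, unless "r_PROTECTED" follows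
lemma pass5_k6 (y : List Char) (hy : ¬ rP <+: y) :
    R kDr vDr (kMs ++ y) = kMs ++ R kDr vDr y := by
  apply R_append
  intro p hp
  simp only [kMs_chars, List.length_cons, List.length_nil] at hp
  interval_cases p <;> try simp [List.isPrefixOf]
  -- remaining position: p = 11, the trailing 'D' of "Ms_PROTECTED"
  rw [← rP_chars]
  exact Bool.eq_false_iff.mpr (fun hb => hy (List.isPrefixOf_iff_prefix.mp hb))

-- ===== the six replace passes, composed =====
def A1 (cs : List Char) : List Char :=
  R kMs vMs (R kDr vDr (R kMrs vMrs (R kMr vMr (R kUS vUS (R kUSA vUSA cs)))))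

lemma prefix_self_append (k x : List Char) : k.isPrefixOf (k ++ x) = true :=
  List.isPrefixOf_iff_prefix.mpr (List.prefix_append k x)

lemma drop_key (k x : List Char) (hk : k ≠ []) :
    List.drop (max 1 k.length) (k ++ x) = x := by
  rw [Nat.max_eq_right (List.length_pos_of_ne_nil hk)]
  exact List.drop_left

lemma A1_k1 (x : List Char) : A1 (kUSA ++ x) = vUSA ++ A1 x := by
  unfold A1
  rw [R_pos kUSA vUSA _ (prefix_self_append _ _) (by simp), drop_key kUSA x (by simp)]
  rw [val_absorb kUS vUS vUSA _ (by simp) (by simp),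
      val_absorb kMr vMr vUSA _ (by simp) (by simp),
      val_absorb kMrs vMrs vUSA _ (by simp) (by simp),
      val_absorb kDr vDr vUSA _ (by simp) (by simp),
      val_absorb kMs vMs vUSA _ (by simp) (by simp)]

lemma A1_k2 (x : List Char) : A1 (kUS ++ x) = vUS ++ A1 x := by
  unfold A1
  rw [key_pass kUSA vUSA kUS _ (by simp)]
  rw [R_pos kUS vUS _ (prefix_self_append _ _) (by simp), drop_key kUS _ (by simp)]
  rw [val_absorb kMr vMr vUS _ (by simp) (by simp),
      val_absorb kMrs vMrs vUS _ (by simp) (by simp),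
      val_absorb kDr vDr vUS _ (by simp) (by simp),
      val_absorb kMs vMs vUS _ (by simp) (by simp)]

lemma A1_k3 (x : List Char) : A1 (kMr ++ x) = vMr ++ A1 x := by
  unfold A1
  rw [key_pass kUSA vUSA kMr _ (by simp),
      key_pass kUS vUS kMr _ (by simp)]
  rw [R_pos kMr vMr _ (prefix_self_append _ _) (by simp), drop_key kMr _ (by simp)]
  rw [val_absorb kMrs vMrs vMr _ (by simp) (by simp),
      val_absorb kDr vDr vMr _ (by simp) (by simp),
      val_absorb kMs vMs vMr _ (by simp) (by simp)]

lemma A1_k4 (x : List Char) : A1 (kMrs ++ x) = vMrs ++ A1 x := by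
  unfold A1
  rw [key_pass kUSA vUSA kMrs _ (by simp),
      key_pass kUS vUS kMrs _ (by simp),
      key_pass kMr vMr kMrs _ (by simp)]
  rw [R_pos kMrs vMrs _ (prefix_self_append _ _) (by simp), drop_key kMrs _ (by simp)]
  rw [val_absorb kDr vDr vMrs _ (by simp) (by simp),
      val_absorb kMs vMs vMrs _ (by simp) (by simp)]

lemma A1_k5 (x : List Char) : A1 (kDr ++ x) = vDr ++ A1 x := by
  unfold A1
  rw [key_pass kUSA vUSA kDr _ (by simp),
      key_pass kUS vUS kDr _ (by simp),
      key_pass kMr vMr kDr _ (by simp),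
      key_pass kMrs vMrs kDr _ (by simp)]
  rw [R_pos kDr vDr _ (prefix_self_append _ _) (by simp), drop_key kDr _ (by simp)]
  rw [val_absorb kMs vMs vDr _ (by simp) (by simp)]

lemma pull1 (old new p : List Char) (hnew : new = vUSA ∨ new = vUS ∨ new = vMr ∨ new = vMrs)
    (hp : ∀ c ∈ p, c ≠ 'U' ∧ c ≠ 'M') (x : List Char) :
    p <+: R old new x → p <+: x := by
  apply prefix_R_pullback
  · rcases hnew with rfl | rfl | rfl | rfl <;> simp
  · intro c hc
    rcases hnew with rfl | rfl | rfl | rfl <;> simp [(hp c hc).1, (hp c hc).2]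

-- pull a pattern containing no 'U'/'M' back through the first four passes
lemma pull4 (p : List Char) (hp : ∀ c ∈ p, c ≠ 'U' ∧ c ≠ 'M') (x : List Char) :
    p <+: R kMrs vMrs (R kMr vMr (R kUS vUS (R kUSA vUSA x))) → p <+: x := fun h =>
  pull1 kUSA vUSA p (by simp) hp x
    (pull1 kUS vUS p (by simp) hp _
      (pull1 kMr vMr p (by simp) hp _
        (pull1 kMrs vMrs p (by simp) hp _ h)))

lemma A1_k6 (x : List Char) (hx : ¬ rP <+: x) : A1 (kMs ++ x) = vMs ++ A1 x := by
  unfold A1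
  rw [key_pass kUSA vUSA kMs _ (by simp),
      key_pass kUS vUS kMs _ (by simp),
      key_pass kMr vMr kMs _ (by simp),
      key_pass kMrs vMrs kMs _ (by simp)]
  rw [pass5_k6 _ (fun h => hx (pull4 rP (by simp) x h))]
  rw [R_pos kMs vMs _ (prefix_self_append _ _) (by simp), drop_key kMs _ (by simp)]

-- no token matches at the head: every pass steps over the first character
lemma not_prefix_step (k : List Char) (a : Char) (tl : List Char) (hk : k = a :: tl)
    (c : Char) (u t' : List Char)
    (hpull : tl <+: u → tl <+: t')
    (hori : ¬ k.isPrefixOf (c :: t') = true) :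
    k.isPrefixOf (c :: u) = false := by
  apply Bool.eq_false_iff.mpr
  intro hb
  have hpre := List.isPrefixOf_iff_prefix.mp hb
  subst hk
  rw [List.cons_prefix_cons] at hpre
  exact hori (List.isPrefixOf_iff_prefix.mpr (List.cons_prefix_cons.mpr ⟨hpre.1, hpull hpre.2⟩))

lemma A1_cons (c : Char) (t : List Char)
    (h1 : ¬ kUSA.isPrefixOf (c :: t) = true) (h2 : ¬ kUS.isPrefixOf (c :: t) = true)
    (h3 : ¬ kMr.isPrefixOf (c :: t) = true) (h4 : ¬ kMrs.isPrefixOf (c :: t) = true)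
    (h5 : ¬ kDr.isPrefixOf (c :: t) = true) (h6 : ¬ kMs.isPrefixOf (c :: t) = true)
    (hno : ¬ Ppat <+: (c :: t)) :
    A1 (c :: t) = c :: A1 t := by
  unfold A1
  rw [R_neg kUSA vUSA c t (Bool.eq_false_iff.mpr h1)]
  rw [R_neg kUS vUS c _ (not_prefix_step kUS 'U'
    ['S', '_', 'P', 'R', 'O', 'T', 'E', 'C', 'T', 'E', 'D'] (by simp) c _ t
    (fun h => pull1 kUSA vUSA _ (by simp) (by simp) t h) h2)]
  rw [R_neg kMr vMr c _ (not_prefix_step kMr 'M'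
    ['r', '_', 'P', 'R', 'O', 'T', 'E', 'C', 'T', 'E', 'D'] (by simp) c _ t
    (fun h => pull1 kUSA vUSA _ (by simp) (by simp) t
      (pull1 kUS vUS _ (by simp) (by simp) _ h)) h3)]
  rw [R_neg kMrs vMrs c _ (not_prefix_step kMrs 'M'
    ['r', 's', '_', 'P', 'R', 'O', 'T', 'E', 'C', 'T', 'E', 'D'] (by simp) c _ t
    (fun h => pull1 kUSA vUSA _ (by simp) (by simp) t
      (pull1 kUS vUS _ (by simp) (by simp) _
        (pull1 kMr vMr _ (by simp) (by simp) _ h))) h4)]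
  rw [R_neg kDr vDr c _ (not_prefix_step kDr 'D' rP (by simp) c _ t
    (fun h => pull4 rP (by simp) t h) h5)]
  -- the Ms-token check at the head, through the Dr-pass
  have s6 : kMs.isPrefixOf
      (c :: R kDr vDr (R kMrs vMrs (R kMr vMr (R kUS vUS (R kUSA vUSA t))))) = false := by
    apply Bool.eq_false_iff.mpr
    intro hb
    have hpre := List.isPrefixOf_iff_prefix.mp hb
    rw [show kMs = 'M' :: sPp from rfl, List.cons_prefix_cons] at hpre
    obtain ⟨hc, htl⟩ := hpre
    rcases sPp_pullback _ 0 (by simpa using htl) with hL | hR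
    · have hLt : sPp <+: t := pull4 sPp (by simp) t (by simpa using hL)
      exact h6 (List.isPrefixOf_iff_prefix.mpr
        (by rw [show kMs = 'M' :: sPp from rfl]; exact List.cons_prefix_cons.mpr ⟨hc, hLt⟩))
    · have hQ : Qpat <+: t := pull4 Qpat (by simp) t (by simpa using hR)
      apply hno
      rw [show Ppat = 'M' :: Qpat from rfl]
      exact List.cons_prefix_cons.mpr ⟨hc, hQ⟩
  rw [R_neg kMs vMs c _ s6]

-- unfolding the scanner on a matched token or an unmatched head character
lemma scan_k1 (x : List Char) : scanRestore (kUSA ++ x) = vUSA ++ scanRestore x := by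
  simp [scanRestore, List.isPrefixOf]

lemma scan_k2 (x : List Char) : scanRestore (kUS ++ x) = vUS ++ scanRestore x := by
  simp [scanRestore, List.isPrefixOf]

lemma scan_k3 (x : List Char) : scanRestore (kMr ++ x) = vMr ++ scanRestore x := by
  simp [scanRestore, List.isPrefixOf]

lemma scan_k4 (x : List Char) : scanRestore (kMrs ++ x) = vMrs ++ scanRestore x := by
  simp [scanRestore, List.isPrefixOf]

lemma scan_k5 (x : List Char) : scanRestore (kDr ++ x) = vDr ++ scanRestore x := by
  simp [scanRestore, List.isPrefixOf]

lemma scan_k6 (x : List Char) : scanRestore (kMs ++ x) = vMs ++ scanRestore x := by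
  simp [scanRestore, List.isPrefixOf]

lemma scan_cons (c : Char) (t : List Char)
    (h1 : ¬ kUSA.isPrefixOf (c :: t) = true) (h2 : ¬ kUS.isPrefixOf (c :: t) = true)
    (h3 : ¬ kMr.isPrefixOf (c :: t) = true) (h4 : ¬ kMrs.isPrefixOf (c :: t) = true)
    (h5 : ¬ kDr.isPrefixOf (c :: t) = true) (h6 : ¬ kMs.isPrefixOf (c :: t) = true) :
    scanRestore (c :: t) = c :: scanRestore t := by
  rw [scanRestore]
  simp only [Bool.eq_false_iff.mpr h1, Bool.eq_false_iff.mpr h2, Bool.eq_false_iff.mpr h3,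
    Bool.eq_false_iff.mpr h4, Bool.eq_false_iff.mpr h5, Bool.eq_false_iff.mpr h6,
    Bool.false_eq_true, if_false]

lemma infix_of_infix_suffix (p u v : List Char) (h : p <:+: u) (hs : u <:+ v) : p <:+: v :=
  h.trans hs.isInfix

-- the heart of the equivalence: outside the overlap pattern, the six sequential
-- passes compute exactly what the single scan computes
lemma main_eq : ∀ (cs : List Char), ¬ Ppat <:+: cs → A1 cs = scanRestore cs := by
  suffices H : ∀ (n : Nat) (cs : List Char), cs.length ≤ n → ¬ Ppat <:+: cs → A1 cs = scanRestore cs by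
    exact fun cs h => H cs.length cs le_rfl h
  intro n
  induction n with
  | zero =>
    intro cs hl _
    have : cs = [] := List.length_eq_zero_iff.mp (Nat.le_zero.mp hl)
    subst this
    simp [A1, R_nil, scanRestore]
  | succ n ih =>
    intro cs hl hno
    cases cs with
    | nil => simp [A1, R_nil, scanRestore]
    | cons c t =>
      by_cases hk1 : kUSA.isPrefixOf (c :: t) = true
      · obtain ⟨x, hx⟩ := List.isPrefixOf_iff_prefix.mp hk1
        rw [← hx] at hno hl ⊢
        rw [A1_k1, scan_k1]
        refine congrArg (vUSA ++ ·) (ih x ?_ ?_)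
        · simp at hl; omega
        · exact fun h => hno (infix_of_infix_suffix _ _ _ h (List.suffix_append _ _))
      by_cases hk2 : kUS.isPrefixOf (c :: t) = true
      · obtain ⟨x, hx⟩ := List.isPrefixOf_iff_prefix.mp hk2
        rw [← hx] at hno hl ⊢
        rw [A1_k2, scan_k2]
        refine congrArg (vUS ++ ·) (ih x ?_ ?_)
        · simp at hl; omega
        · exact fun h => hno (infix_of_infix_suffix _ _ _ h (List.suffix_append _ _))
      by_cases hk3 : kMr.isPrefixOf (c :: t) = true
      · obtain ⟨x, hx⟩ := List.isPrefixOf_iff_prefix.mp hk3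
        rw [← hx] at hno hl ⊢
        rw [A1_k3, scan_k3]
        refine congrArg (vMr ++ ·) (ih x ?_ ?_)
        · simp at hl; omega
        · exact fun h => hno (infix_of_infix_suffix _ _ _ h (List.suffix_append _ _))
      by_cases hk4 : kMrs.isPrefixOf (c :: t) = true
      · obtain ⟨x, hx⟩ := List.isPrefixOf_iff_prefix.mp hk4
        rw [← hx] at hno hl ⊢
        rw [A1_k4, scan_k4]
        refine congrArg (vMrs ++ ·) (ih x ?_ ?_)
        · simp at hl; omega
        · exact fun h => hno (infix_of_infix_suffix _ _ _ h (List.suffix_append _ _))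
      by_cases hk5 : kDr.isPrefixOf (c :: t) = true
      · obtain ⟨x, hx⟩ := List.isPrefixOf_iff_prefix.mp hk5
        rw [← hx] at hno hl ⊢
        rw [A1_k5, scan_k5]
        refine congrArg (vDr ++ ·) (ih x ?_ ?_)
        · simp at hl; omega
        · exact fun h => hno (infix_of_infix_suffix _ _ _ h (List.suffix_append _ _))
      by_cases hk6 : kMs.isPrefixOf (c :: t) = true
      · obtain ⟨x, hx⟩ := List.isPrefixOf_iff_prefix.mp hk6
        rw [← hx] at hno hl ⊢
        have hnr : ¬ rP <+: x := by
          intro h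
          obtain ⟨w, rfl⟩ := h
          refine hno (List.IsPrefix.isInfix ?_)
          exact ⟨w, by rw [show Ppat = kMs ++ rP from rfl]; simp⟩
        rw [A1_k6 x hnr, scan_k6]
        refine congrArg (vMs ++ ·) (ih x ?_ ?_)
        · simp at hl; omega
        · exact fun h => hno (infix_of_infix_suffix _ _ _ h (List.suffix_append _ _))
      · rw [A1_cons c t hk1 hk2 hk3 hk4 hk5 hk6 (fun h => hno h.isInfix),
            scan_cons c t hk1 hk2 hk3 hk4 hk5 hk6]
        refine congrArg (c :: ·) (ih t ?_ ?_)
        · simp at hl; omega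
        · exact fun h => hno (infix_of_infix_suffix _ _ _ h (List.suffix_cons c t))

-- lift to one sentence, as A's inner loop over the dict items
lemma innerA_eq (s : String) :
    restoreDict.items.foldl (fun s2 p => PySem.Str.replace s2 p.1 p.2) s
      = String.ofList (A1 s.toList) := by
  have hitems : restoreDict.items
      = [("USA_PROTECTED", "U.S.A."), ("US_PROTECTED", "U.S."), ("Mr_PROTECTED", "Mr."),
         ("Mrs_PROTECTED", "Mrs."), ("Dr_PROTECTED", "Dr."), ("Ms_PROTECTED", "Ms.")] := by
    decide
  rw [hitems]
  simp only [List.foldl_cons, List.foldl_nil]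
  apply String.toList_inj.mp
  rw [String.toList_ofList]
  simp only [PySem.Str.toList_replace]
  rw [replace_eq_R _ _ _ (by decide), replace_eq_R _ _ _ (by decide),
      replace_eq_R _ _ _ (by decide), replace_eq_R _ _ _ (by decide),
      replace_eq_R _ _ _ (by decide), replace_eq_R _ _ _ (by decide)]
  rfl

lemma inner_eq (s : String) (h : ¬ Ppat <:+: s.toList) :
    restoreDict.items.foldl (fun s2 p => PySem.Str.replace s2 p.1 p.2) s
      = String.ofList (scanRestore s.toList) := by
  rw [innerA_eq, main_eq s.toList h]

-- ===== A ≠ B on every input inside the change region =====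

-- a placeholder-pattern occurrence never starts inside the tail of a token ('M' only leads)
lemma infix_strip (pre x : List Char) (hM : 'M' ∉ pre) (h : Ppat <:+: pre ++ x) :
    Ppat <:+: x := by
  induction pre with
  | nil => simpa using h
  | cons a pre ih =>
    rw [List.cons_append] at h
    rcases List.infix_cons_iff.mp h with hp | hi
    · exfalso
      rw [show Ppat = 'M' :: Qpat from rfl, List.cons_prefix_cons] at hp
      exact hM (by rw [← hp.1]; exact List.mem_cons_self)
    · exact ih (fun hm => hM (List.mem_cons_of_mem a hm)) hi

-- the first four passes step over the whole pattern in place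
lemma Ppat_pass (old new : List Char) (w : List Char)
    (hold : old = kUSA ∨ old = kUS ∨ old = kMr ∨ old = kMrs) :
    R old new (Ppat ++ w) = Ppat ++ R old new w := by
  apply R_append
  intro p hp
  simp only [Ppat_chars, List.length_cons, List.length_nil] at hp
  rcases hold with rfl | rfl | rfl | rfl <;> interval_cases p <;> simp [List.isPrefixOf]

-- where the pattern leads, A produces "Ms.r." while B produces "Ms.r_", so they differ
lemma caseA (w : List Char) : A1 (Ppat ++ w) ≠ scanRestore (Ppat ++ w) := by
  have hA : A1 (Ppat ++ w)
      = vMs ++ ('r' :: '.' ::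
          R kMs vMs (R kDr vDr (R kMrs vMrs (R kMr vMr (R kUS vUS (R kUSA vUSA w)))))) := by
    unfold A1
    rw [Ppat_pass kUSA vUSA w (Or.inl rfl),
        Ppat_pass kUS vUS _ (Or.inr (Or.inl rfl)),
        Ppat_pass kMr vMr _ (Or.inr (Or.inr (Or.inl rfl))),
        Ppat_pass kMrs vMrs _ (Or.inr (Or.inr (Or.inr rfl)))]
    rw [show Ppat ++ R kMrs vMrs (R kMr vMr (R kUS vUS (R kUSA vUSA w)))
        = ['M', 's', '_', 'P', 'R', 'O', 'T', 'E', 'C', 'T', 'E']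
          ++ (kDr ++ R kMrs vMrs (R kMr vMr (R kUS vUS (R kUSA vUSA w)))) from rfl]
    rw [R_append kDr vDr ['M', 's', '_', 'P', 'R', 'O', 'T', 'E', 'C', 'T', 'E'] _
      (by intro p hp; simp only [List.length_cons, List.length_nil] at hp
          interval_cases p <;> simp [List.isPrefixOf])]
    rw [R_pos kDr vDr _ (prefix_self_append _ _) (by simp), drop_key kDr _ (by simp)]
    rw [show (['M', 's', '_', 'P', 'R', 'O', 'T', 'E', 'C', 'T', 'E'] : List Char)
        ++ (vDr ++ R kDr vDr (R kMrs vMrs (R kMr vMr (R kUS vUS (R kUSA vUSA w)))))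
        = kMs ++ ('r' :: '.' ::
            R kDr vDr (R kMrs vMrs (R kMr vMr (R kUS vUS (R kUSA vUSA w))))) from rfl]
    rw [R_pos kMs vMs _ (prefix_self_append _ _) (by simp), drop_key kMs _ (by simp)]
    rw [R_neg kMs vMs 'r' _ (by simp [List.isPrefixOf]),
        R_neg kMs vMs '.' _ (by simp [List.isPrefixOf])]
  have hB : scanRestore (Ppat ++ w)
      = vMs ++ ('r' :: '_' :: scanRestore ("PROTECTED".toList ++ w)) := by
    rw [show Ppat ++ w = kMs ++ (rP ++ w) from rfl]
    rw [scan_k6]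
    rw [show rP ++ w = 'r' :: ("_PROTECTED".toList ++ w) from rfl]
    rw [scan_cons 'r' _ (by simp [List.isPrefixOf]) (by simp [List.isPrefixOf])
      (by simp [List.isPrefixOf]) (by simp [List.isPrefixOf]) (by simp [List.isPrefixOf])
      (by simp [List.isPrefixOf])]
    rw [show ("_PROTECTED".toList ++ w : List Char) = '_' :: ("PROTECTED".toList ++ w) from rfl]
    rw [scan_cons '_' _ (by simp [List.isPrefixOf]) (by simp [List.isPrefixOf])
      (by simp [List.isPrefixOf]) (by simp [List.isPrefixOf]) (by simp [List.isPrefixOf])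
      (by simp [List.isPrefixOf])]
  rw [hA, hB]
  intro h
  simp at h

lemma A1_ne_scan : ∀ (cs : List Char), Ppat <:+: cs → A1 cs ≠ scanRestore cs := by
  suffices H : ∀ (n : Nat) (cs : List Char), cs.length ≤ n → Ppat <:+: cs →
      A1 cs ≠ scanRestore cs by
    exact fun cs h => H cs.length cs le_rfl h
  intro n
  induction n with
  | zero =>
    intro cs hl hin
    exfalso
    have := hin.length_le
    simp at this
    omega
  | succ n ih =>
    intro cs hl hin
    by_cases hpre : Ppat <+: cs
    · obtain ⟨w, rfl⟩ := hpre
      exact caseA w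
    cases cs with
    | nil =>
      exfalso
      have := hin.length_le
      simp at this
    | cons c t =>
      have hint : Ppat <:+: t := by
        rcases List.infix_cons_iff.mp hin with h | h
        · exact absurd h hpre
        · exact h
      by_cases hk1 : kUSA.isPrefixOf (c :: t) = true
      · obtain ⟨x, hx⟩ := List.isPrefixOf_iff_prefix.mp hk1
        have ht : t = ['S', 'A', '_', 'P', 'R', 'O', 'T', 'E', 'C', 'T', 'E', 'D'] ++ x := by
          have h' := hx
          rw [show kUSA ++ x = 'U' :: (['S', 'A', '_', 'P', 'R', 'O', 'T', 'E', 'C', 'T', 'E', 'D'] ++ x) from rfl,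
            List.cons.injEq] at h'
          exact h'.2.symm
        have hxin : Ppat <:+: x := infix_strip _ x (by simp) (ht ▸ hint)
        rw [← hx, A1_k1, scan_k1]
        intro h
        exact ih x (by have := congrArg List.length hx; simp at this hl; omega) hxin
          (List.append_cancel_left h)
      by_cases hk2 : kUS.isPrefixOf (c :: t) = true
      · obtain ⟨x, hx⟩ := List.isPrefixOf_iff_prefix.mp hk2
        have ht : t = ['S', '_', 'P', 'R', 'O', 'T', 'E', 'C', 'T', 'E', 'D'] ++ x := by
          have h' := hx
          rw [show kUS ++ x = 'U' :: (['S', '_', 'P', 'R', 'O', 'T', 'E', 'C', 'T', 'E', 'D'] ++ x) from rfl,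
            List.cons.injEq] at h'
          exact h'.2.symm
        have hxin : Ppat <:+: x := infix_strip _ x (by simp) (ht ▸ hint)
        rw [← hx, A1_k2, scan_k2]
        intro h
        exact ih x (by have := congrArg List.length hx; simp at this hl; omega) hxin
          (List.append_cancel_left h)
      by_cases hk3 : kMr.isPrefixOf (c :: t) = true
      · obtain ⟨x, hx⟩ := List.isPrefixOf_iff_prefix.mp hk3
        have ht : t = ['r', '_', 'P', 'R', 'O', 'T', 'E', 'C', 'T', 'E', 'D'] ++ x := by
          have h' := hx
          rw [show kMr ++ x = 'M' :: (['r', '_', 'P', 'R', 'O', 'T', 'E', 'C', 'T', 'E', 'D'] ++ x) from rfl,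
            List.cons.injEq] at h'
          exact h'.2.symm
        have hxin : Ppat <:+: x := infix_strip _ x (by simp) (ht ▸ hint)
        rw [← hx, A1_k3, scan_k3]
        intro h
        exact ih x (by have := congrArg List.length hx; simp at this hl; omega) hxin
          (List.append_cancel_left h)
      by_cases hk4 : kMrs.isPrefixOf (c :: t) = true
      · obtain ⟨x, hx⟩ := List.isPrefixOf_iff_prefix.mp hk4
        have ht : t = ['r', 's', '_', 'P', 'R', 'O', 'T', 'E', 'C', 'T', 'E', 'D'] ++ x := by
          have h' := hx
          rw [show kMrs ++ x = 'M' :: (['r', 's', '_', 'P', 'R', 'O', 'T', 'E', 'C', 'T', 'E', 'D'] ++ x) from rfl,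
            List.cons.injEq] at h'
          exact h'.2.symm
        have hxin : Ppat <:+: x := infix_strip _ x (by simp) (ht ▸ hint)
        rw [← hx, A1_k4, scan_k4]
        intro h
        exact ih x (by have := congrArg List.length hx; simp at this hl; omega) hxin
          (List.append_cancel_left h)
      by_cases hk5 : kDr.isPrefixOf (c :: t) = true
      · obtain ⟨x, hx⟩ := List.isPrefixOf_iff_prefix.mp hk5
        have ht : t = ['r', '_', 'P', 'R', 'O', 'T', 'E', 'C', 'T', 'E', 'D'] ++ x := by
          have h' := hx
          rw [show kDr ++ x = 'D' :: (['r', '_', 'P', 'R', 'O', 'T', 'E', 'C', 'T', 'E', 'D'] ++ x) from rfl,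
            List.cons.injEq] at h'
          exact h'.2.symm
        have hxin : Ppat <:+: x := infix_strip _ x (by simp) (ht ▸ hint)
        rw [← hx, A1_k5, scan_k5]
        intro h
        exact ih x (by have := congrArg List.length hx; simp at this hl; omega) hxin
          (List.append_cancel_left h)
      by_cases hk6 : kMs.isPrefixOf (c :: t) = true
      · obtain ⟨x, hx⟩ := List.isPrefixOf_iff_prefix.mp hk6
        have ht : t = ['s', '_', 'P', 'R', 'O', 'T', 'E', 'C', 'T', 'E', 'D'] ++ x := by
          have h' := hx
          rw [show kMs ++ x = 'M' :: (['s', '_', 'P', 'R', 'O', 'T', 'E', 'C', 'T', 'E', 'D'] ++ x) from rfl,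
            List.cons.injEq] at h'
          exact h'.2.symm
        have hxin : Ppat <:+: x := infix_strip _ x (by simp) (ht ▸ hint)
        have hnr : ¬ rP <+: x := by
          intro h
          obtain ⟨v, rfl⟩ := h
          exact hpre (by rw [← hx]; exact ⟨v, by rw [show Ppat = kMs ++ rP from rfl]; simp⟩)
        rw [← hx, A1_k6 x hnr, scan_k6]
        intro h
        exact ih x (by have := congrArg List.length hx; simp at this hl; omega) hxin
          (List.append_cancel_left h)
      · rw [A1_cons c t hk1 hk2 hk3 hk4 hk5 hk6 hpre,
            scan_cons c t hk1 hk2 hk3 hk4 hk5 hk6]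
        intro h
        rw [List.cons.injEq] at h
        exact ih t (by simp at hl; omega) hint h.2

-- =====  VERDICT =====
theorem restore_abbreviations_spec : Claim_unchanged_restore_abbreviations := by
  intro sentences _ hnd
  unfold restore_abbreviations restore_abbreviations_alt
  rw [PySem.List.foldl_append_singleton_eq_map, PySem.List.foldl_append_singleton_eq_map]
  apply List.map_congr_left
  intro s hs
  apply inner_eq
  intro hinf
  exact hnd ⟨s, hs, (PySem.Str.isIn_iff_infix _ _).mpr hinf⟩

theorem restore_abbreviations_changed : Claim_changed_restore_abbreviations := by
  unfold Claim_changed_restore_abbreviations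
  have hscan : scanRestore ("Ms_PROTECTEDr_PROTECTED".toList) = "Ms.r_PROTECTED".toList := by
    simp [scanRestore]
  refine ⟨by decide, by decide, rfl, ?_, ?_⟩
  · show [String.ofList (scanRestore "Ms_PROTECTEDr_PROTECTED".toList)] = ["Ms.r_PROTECTED"]
    rw [hscan, String.ofList_toList]
  intro h
  exact absurd (congrArg (List.map String.toList) h) (by decide)

theorem restore_abbreviations_tight : Claim_exact_restore_abbreviations := by
  intro sentences _ hd heq
  obtain ⟨s, hs, hin⟩ := hd
  unfold restore_abbreviations restore_abbreviations_alt at heq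
  rw [PySem.List.foldl_append_singleton_eq_map, PySem.List.foldl_append_singleton_eq_map] at heq
  have hps := List.map_inj_left.mp heq s hs
  rw [innerA_eq] at hps
  have h2 : A1 s.toList = scanRestore s.toList := by
    have := congrArg String.toList hps
    simpa using this
  exact A1_ne_scan s.toList ((PySem.Str.isIn_iff_infix _ _).mp hin) h2
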